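-- pv_equiv track=rewrite | github.com/sorice/preprocess | preprocess/grams/ngrams.py | _ngram_split
-- ===== SOURCE A (Python) =====
-- def _ngram_split(text,n):
--     ngram = ''
--     gram_count = 0
--     for i,word in enumerate(text.split(),1):
--         if gram_count-n == -1 and i > n:
--             ngram = ngram[ngram.find(' ')+1:]
--         ngram += word+' '; gram_count+=1
--         if gram_count == n:
--             gram_count -= 1
--             yield ngram
-- ===== SOURCE B (Python) =====
-- def _ngram_split(text, n):
--     words = text.split()
--     if n < 1:
--         return
--     for i in range(len(words) - n + 1):
--         yield ' '.join(words[i:i+n]) + ' '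
-- ===== Notes on version B (the rewrite author's own statement) =====
-- stated objective: simpler
-- what changed: B splits the text once into a word list and emits each n-gram by directly slicing and joining a sliding window, replacing A's incremental string concatenation with find-and-cut bookkeeping and its gram counter.
import Mathlib
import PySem

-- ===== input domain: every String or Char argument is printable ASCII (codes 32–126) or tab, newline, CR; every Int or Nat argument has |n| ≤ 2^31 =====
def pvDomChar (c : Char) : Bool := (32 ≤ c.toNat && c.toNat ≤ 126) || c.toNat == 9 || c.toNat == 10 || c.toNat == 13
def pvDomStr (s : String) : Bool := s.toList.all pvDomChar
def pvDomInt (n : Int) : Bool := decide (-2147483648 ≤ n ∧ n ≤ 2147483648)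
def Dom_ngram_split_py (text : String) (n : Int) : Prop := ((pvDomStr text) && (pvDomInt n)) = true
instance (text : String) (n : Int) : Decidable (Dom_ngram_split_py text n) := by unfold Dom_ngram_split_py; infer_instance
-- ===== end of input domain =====

-- B replaces A's incremental concatenate-and-trim n-gram buffer with direct slicing of the
-- word list (simpler decomposition, same asymptotic cost); both Pythons are generators,
-- compared as the list of yielded strings.

-- ===== PORT A =====
-- A's loop state: (ngram : List Char, gram_count : Int, yielded strings).
-- The n-gram string is handled on the List Char side (PySem convention); yields collect into a list.
def pvBodyA (n : Int) (s : List Char × Int × List String) (iw : Int × String) :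
    List Char × Int × List String :=
  let ngram0 := if s.2.1 - n == -1 && decide (iw.1 > n)
    then PySem.List.slice s.1 (some (PySem.Chars.find s.1 [' '] + 1)) none
    else s.1
  let ngram := ngram0 ++ iw.2.toList ++ [' ']
  let gc := s.2.1 + 1
  if gc == n then (ngram, gc - 1, s.2.2 ++ [String.ofList ngram])
  else (ngram, gc, s.2.2)

def ngram_split_py (text : String) (n : Int) : List String :=
  ((PySem.List.enumerate (PySem.Str.split₀ text) 1).foldl (pvBodyA n) ([], 0, [])).2.2

-- ===== PORT B =====
-- Source B: words = text.split(); guard n < 1; yield ' '.join(words[i:i+n]) + ' ' per window.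
-- (PySem.Str.join IS String.ofList of PySem.Chars.join on the toLists, by definition; the
-- trailing ' ' is appended on the List Char side.)
def ngram_split_py_alt (text : String) (n : Int) : List String :=
  let words := PySem.Str.split₀ text
  if n < 1 then []
  else (PySem.List.pyRange 0 ((words.length : Int) - n + 1)).map (fun i =>
    String.ofList
      (PySem.Chars.join [' ']
        ((PySem.List.slice words (some i) (some (i + n))).map String.toList) ++ [' ']))

-- ===== PRECONDITION & SPEC =====
def Spec_ngram_split_py (text : String) (n : Int) (out : List String) : Prop := out = ngram_split_py_alt text n
instance (text : String) (n : Int) (out : List String) : Decidable (Spec_ngram_split_py text n out) := by unfold Spec_ngram_split_py; infer_instance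

-- ===== CLAIM (what is proved, stated in full; the proofs are below) =====
def Claim_equal_ngram_split_py : Prop := ∀ (text : String) (n : Int), Dom_ngram_split_py text n → Spec_ngram_split_py text n (ngram_split_py text n)

-- ===== LEMMAS AND PROOFS =====

-- a word followed by the trailing space A and B both append
def pvW (w : String) : List Char := w.toList ++ [' ']

-- the sliding windows of n words, each word with its trailing space, flattened
def pvWins (ws : List String) (n : Nat) : List (List Char) :=
  (List.range (ws.length + 1 - n)).map (fun i => (((ws.drop i).take n).map pvW).flatten)

-- A's loop state after processing the prefix `done` (case 1 ≤ n)
def pvS (n : Int) (done : List String) : List Char × Int × List String :=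
  ( ((done.drop (done.length - n.toNat)).map pvW).flatten,
    if (done.length : Int) < n then (done.length : Int) else n - 1,
    (pvWins done n.toNat).map String.ofList )

-- words produced by split() contain no whitespace characters
lemma pvGoNoSpace :
    ∀ (s cur : List Char) (accl : List (List Char)),
      (∀ w ∈ accl, ∀ c ∈ w, PySem.Chars.isspace c = false) →
      (∀ c ∈ cur, PySem.Chars.isspace c = false) →
      ∀ w ∈ PySem.Chars.split₀.go s cur accl, ∀ c ∈ w, PySem.Chars.isspace c = false := by
  intro s
  induction s with
  | nil =>
    intro cur accl hacc hcur w hw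
    rw [PySem.Chars.split₀.go.eq_def] at hw
    by_cases hc : cur.isEmpty = true
    · simp only [hc, if_true] at hw
      exact hacc w (List.mem_reverse.1 hw)
    · have hw' : w ∈ cur.reverse :: accl := by
        simp only [hc, if_false] at hw
        exact List.mem_reverse.1 hw
      rcases List.mem_cons.1 hw' with h | h
      · subst h; intro c hc'; exact hcur c (List.mem_reverse.1 hc')
      · exact hacc w h
  | cons a rest ih =>
    intro cur accl hacc hcur w hw
    rw [PySem.Chars.split₀.go.eq_def] at hw
    by_cases ha : PySem.Chars.isspace a
    · simp only [ha, if_true] at hw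
      by_cases hc : cur.isEmpty
      · simp only [hc, if_true] at hw
        exact ih [] accl hacc (by simp) w hw
      · simp only [hc, if_false] at hw
        refine ih [] (cur.reverse :: accl) ?_ (by simp) w hw
        intro v hv
        rcases List.mem_cons.1 hv with h | h
        · subst h; intro c hc'; exact hcur c (List.mem_reverse.1 hc')
        · exact hacc v h
    · simp only [ha, if_false] at hw
      refine ih (a :: cur) accl hacc ?_ w hw
      intro c hc'
      rcases List.mem_cons.1 hc' with h | h
      · subst h; simpa using ha
      · exact hcur c h

lemma pvWordNoSpace (text : String) (w : String) (hw : w ∈ PySem.Str.split₀ text) :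
    ' ' ∉ w.toList := by
  have hmem : w.toList ∈ PySem.Chars.split₀ text.toList := by
    rw [← PySem.Str.split₀_map_toList]
    exact List.mem_map_of_mem hw
  have h := pvGoNoSpace text.toList [] [] (by simp) (by simp) w.toList
    (by simpa [PySem.Chars.split₀] using hmem)
  intro hsp
  have := h ' ' hsp
  simp [PySem.Chars.isspace] at this

-- ' '.find on a no-space word followed by ' ' and a rest
lemma pvFindGo (w : List Char) (rest : List Char) (k : Nat) (h : ' ' ∉ w) :
    PySem.Chars.find.go [' '] (w ++ ' ' :: rest) k = (k : Int) + w.length := by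
  induction w generalizing k with
  | nil =>
    rw [List.nil_append, PySem.Chars.find.go.eq_def]
    simp [List.isPrefixOf]
  | cons c w ih =>
    have hc : c ≠ ' ' := by rintro rfl; exact h List.mem_cons_self
    have h' : ' ' ∉ w := fun hm => h (List.mem_cons_of_mem _ hm)
    rw [List.cons_append, PySem.Chars.find.go.eq_def]
    have hpre : ([' '].isPrefixOf (c :: (w ++ ' ' :: rest))) = false := by
      simp [List.isPrefixOf, Ne.symm hc]
    simp only [hpre, if_false]
    rw [ih (k + 1) h']
    simp only [List.length_cons]
    push_cast
    ring

lemma pvFind (w : List Char) (rest : List Char) (h : ' ' ∉ w) :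
    PySem.Chars.find (w ++ ' ' :: rest) [' '] = (w.length : Int) := by
  have := pvFindGo w rest 0 h
  simpa [PySem.Chars.find] using this

-- ' '.join(window) + ' ' = the flattened word-plus-space form
lemma pvJoin : ∀ (ps : List (List Char)), ps ≠ [] →
    PySem.Chars.join [' '] ps ++ [' '] = (ps.map (· ++ [' '])).flatten := by
  intro ps
  induction ps with
  | nil => intro h; exact absurd rfl h
  | cons p ps ih =>
    intro _
    cases ps with
    | nil => simp [PySem.Chars.join_singleton]
    | cons q rest =>
      rw [PySem.Chars.join_cons_cons]
      simp only [List.append_assoc]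
      rw [ih (by simp)]
      simp [List.append_assoc]

-- appending one word to the processed prefix appends one window (once n ≤ d + 1, 1 ≤ n)
lemma pvWinsSnoc (ws : List String) (w : String) (n : Nat) (hn : 1 ≤ n)
    (hlen : n ≤ ws.length + 1) :
    pvWins (ws ++ [w]) n =
      pvWins ws n ++ [((((ws ++ [w]).drop (ws.length + 1 - n)).take n).map pvW).flatten] := by
  unfold pvWins
  have hr : ws.length + 1 + 1 - n = (ws.length + 1 - n) + 1 := by omega
  simp only [List.length_append, List.length_cons, List.length_nil, Nat.zero_add]
  rw [hr, List.range_succ, List.map_append]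
  congr 1
  apply List.map_congr_left
  intro i hi
  have hi' : i < ws.length + 1 - n := List.mem_range.1 hi
  have hdrop : (ws ++ [w]).drop i = ws.drop i ++ [w] :=
    List.drop_append_of_le_length (by omega)
  rw [hdrop, List.take_append_of_le_length (by simp; omega)]

-- the single loop step preserves the invariant (case 1 ≤ n)
lemma pvStep (n : Int) (hn : 1 ≤ n) (done : List String) (w : String)
    (hok : ∀ x ∈ done, ' ' ∉ x.toList) :
    pvBodyA n (pvS n done) ((done.length : Int) + 1, w) = pvS n (done ++ [w]) := by
  have hn' : 1 ≤ n.toNat := by omega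
  by_cases h1 : (done.length : Int) + 1 < n
  · -- still filling the first window, no yield
    have hgc : (done.length : Int) < n := by omega
    have c1 : (((done.length : Int)) - n == -1 && decide ((done.length : Int) + 1 > n)) = false := by
      have hb : decide ((done.length : Int) + 1 > n) = false := by
        simp only [decide_eq_false_iff_not]; omega
      rw [hb, Bool.and_false]
    have c2 : ((done.length : Int) + 1 == n) = false := by
      simp only [beq_eq_false_iff_ne, ne_eq]; omega
    have e0 : done.length - n.toNat = 0 := by omega
    have wD : pvWins done n.toNat = [] := by
      unfold pvWins
      have e1 : done.length + 1 - n.toNat = 0 := by omega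
      rw [e1, List.range_zero, List.map_nil]
    have wD1 : pvWins (done ++ [w]) n.toNat = [] := by
      unfold pvWins
      have e1 : (done ++ [w]).length + 1 - n.toNat = 0 := by simp; omega
      rw [e1, List.range_zero, List.map_nil]
    have e1 : (done ++ [w]).length - n.toNat = 0 := by simp; omega
    have hgc1 : (((done ++ [w]).length : Int)) < n := by simp; push_cast; omega
    simp only [pvBodyA, pvS, if_pos hgc, c1, Bool.false_eq_true, if_false, c2, e0, e1,
      List.drop_zero, wD, wD1, List.map_nil, if_pos hgc1]
    refine Prod.ext ?_ (Prod.ext ?_ ?_)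
    · dsimp only; simp [pvW, List.append_assoc]
    · dsimp only; simp
    · rfl
  · by_cases h2 : (done.length : Int) + 1 = n
    · -- the first window completes: first yield, no trim (i > n fails)
      have hgc : (done.length : Int) < n := by omega
      have c1 : (((done.length : Int)) - n == -1 && decide ((done.length : Int) + 1 > n)) = false := by
        have hb : decide ((done.length : Int) + 1 > n) = false := by
          simp only [decide_eq_false_iff_not]; omega
        rw [hb, Bool.and_false]
      have c2 : ((done.length : Int) + 1 == n) = true := by
        simp only [beq_iff_eq]; omega
      have e0 : done.length - n.toNat = 0 := by omega
      have wD : pvWins done n.toNat = [] := by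
        unfold pvWins
        have e1 : done.length + 1 - n.toNat = 0 := by omega
        rw [e1, List.range_zero, List.map_nil]
      have hwins := pvWinsSnoc done w n.toNat hn' (by omega)
      have hfull : ((done ++ [w]).drop (done.length + 1 - n.toNat)).take n.toNat = done ++ [w] := by
        have e1 : done.length + 1 - n.toNat = 0 := by omega
        rw [e1, List.drop_zero]
        exact List.take_of_length_le (by simp; omega)
      rw [hfull, wD] at hwins
      have hgc1 : ¬ (((done ++ [w]).length : Int)) < n := by simp; push_cast; omega
      simp only [pvBodyA, pvS, if_pos hgc, c1, Bool.false_eq_true, if_false, c2, if_true, e0,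
        List.drop_zero, wD, List.map_nil, if_neg hgc1, hwins]
      refine Prod.ext ?_ (Prod.ext ?_ ?_)
      · dsimp only
        simp [pvW, List.append_assoc, show done.length + 1 - n.toNat = 0 by omega]
      · dsimp only; omega
      · dsimp only; simp [pvW, List.append_assoc]
    · -- steady state: trim the oldest word, append, yield
      have h3 : n ≤ (done.length : Int) := by omega
      have hd : n.toNat ≤ done.length := by omega
      have hgc : ¬ (done.length : Int) < n := by omega
      have c1 : ((n - 1) - n == -1 && decide ((done.length : Int) + 1 > n)) = true := by
        have hb : decide ((done.length : Int) + 1 > n) = true := by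
          simp only [decide_eq_true_eq]; omega
        have ha2 : ((n - 1 - n) == -1) = true := by simp only [beq_iff_eq]; omega
        rw [ha2, hb]; rfl
      have c2 : ((n - 1) + 1 == n) = true := by simp only [beq_iff_eq]; omega
      have hlen : (done.drop (done.length - n.toNat)).length = n.toNat := by
        simp [List.length_drop]; omega
      obtain ⟨w₀, tl, hdd⟩ : ∃ w₀ tl, done.drop (done.length - n.toNat) = w₀ :: tl := by
        cases hcase : done.drop (done.length - n.toNat) with
        | nil => rw [hcase] at hlen; simp at hlen; omega
        | cons a b => exact ⟨a, b, rfl⟩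
      have hw0 : w₀ ∈ done := List.mem_of_mem_drop (hdd ▸ List.mem_cons_self)
      have hnos : ' ' ∉ w₀.toList := hok _ hw0
      have htl : tl = done.drop (done.length - n.toNat + 1) := by
        rw [← List.tail_drop, hdd]; rfl
      have htllen : tl.length = n.toNat - 1 := by
        rw [hdd] at hlen; simp at hlen; omega
      have hbuf : ((done.drop (done.length - n.toNat)).map pvW).flatten
          = w₀.toList ++ ' ' :: (tl.map pvW).flatten := by
        rw [hdd]; simp [pvW]
      have hfind : PySem.Chars.find (((done.drop (done.length - n.toNat)).map pvW).flatten) [' ']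
          = (w₀.toList.length : Int) := by
        rw [hbuf]; exact pvFind _ _ hnos
      have hslice : PySem.List.slice (((done.drop (done.length - n.toNat)).map pvW).flatten)
          (some ((w₀.toList.length : Int) + 1)) none = (tl.map pvW).flatten := by
        rw [PySem.List.slice_from _ (by positivity), hbuf]
        have ht : (((w₀.toList.length : Int)) + 1).toNat = w₀.toList.length + 1 := by omega
        rw [ht]
        have hsplit : w₀.toList ++ ' ' :: (tl.map pvW).flatten
            = (w₀.toList ++ [' ']) ++ (tl.map pvW).flatten := by simp
        rw [hsplit]
        have hl : w₀.toList.length + 1 = (w₀.toList ++ [' ']).length := by simp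
        rw [hl, List.drop_left]
      have hwins := pvWinsSnoc done w n.toNat hn' (by omega)
      have hdrop1 : (done ++ [w]).drop (done.length + 1 - n.toNat) = tl ++ [w] := by
        have he : done.length + 1 - n.toNat = (done.length - n.toNat) + 1 := by omega
        rw [he, List.drop_append_of_le_length (by omega), ← htl]
      have htake : (tl ++ [w]).take n.toNat = tl ++ [w] :=
        List.take_of_length_le (by simp; omega)
      rw [hdrop1, htake] at hwins
      have e1 : (done ++ [w]).length - n.toNat = done.length + 1 - n.toNat := by simp
      have hgc1 : ¬ (((done ++ [w]).length : Int)) < n := by simp; push_cast; omega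
      simp only [pvBodyA, pvS, if_neg hgc, c1, if_true, c2, hfind, hslice, e1, hdrop1,
        if_neg hgc1, hwins]
      refine Prod.ext ?_ (Prod.ext ?_ ?_)
      · dsimp only; simp [pvW, List.append_assoc]
      · dsimp only; omega
      · dsimp only; simp [pvW, List.append_assoc]

lemma pvLoop (n : Int) (hn : 1 ≤ n) :
    ∀ (rest done : List String), (∀ x ∈ done, ' ' ∉ x.toList) → (∀ x ∈ rest, ' ' ∉ x.toList) →
      List.foldl (pvBodyA n) (pvS n done) (PySem.List.enumerate rest ((done.length : Int) + 1)) =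
        pvS n (done ++ rest) := by
  intro rest
  induction rest with
  | nil => intro done _ _; simp
  | cons r rest ih =>
    intro done hd hr
    rw [PySem.List.enumerate_cons, List.foldl_cons, pvStep n hn done r hd]
    have h1 : ((done.length : Int) + 1) + 1 = (((done ++ [r]).length : Int) + 1) := by
      simp only [List.length_append, List.length_cons, List.length_nil]; push_cast; ring
    rw [h1, ih (done ++ [r])
      (by intro x hx; rcases List.mem_append.1 hx with h | h
          · exact hd x h
          · simp at h; subst h; exact hr _ List.mem_cons_self)
      (fun x hx => hr x (List.mem_cons_of_mem _ hx)), List.append_assoc]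
    rfl

-- the degenerate case n < 1: nothing is ever yielded
lemma pvLoop0 (n : Int) (hn : n < 1) :
    ∀ (rest done : List String),
      List.foldl (pvBodyA n) ((done.map pvW).flatten, (done.length : Int), [])
          (PySem.List.enumerate rest ((done.length : Int) + 1)) =
        (((done ++ rest).map pvW).flatten, ((done ++ rest).length : Int), []) := by
  intro rest
  induction rest with
  | nil => intro done; simp
  | cons r rest ih =>
    intro done
    rw [PySem.List.enumerate_cons, List.foldl_cons]
    have hstep : pvBodyA n ((done.map pvW).flatten, (done.length : Int), [])
        ((done.length : Int) + 1, r) =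
        (((done ++ [r]).map pvW).flatten, (((done ++ [r]).length : Int)), []) := by
      simp only [pvBodyA]
      have h1 : ((done.length : Int) - n == -1) = false := by
        simp only [beq_eq_false_iff_ne, ne_eq]; omega
      have h2 : ((done.length : Int) + 1 == n) = false := by
        simp only [beq_eq_false_iff_ne, ne_eq]; omega
      refine Prod.ext ?_ (Prod.ext ?_ ?_) <;>
        simp [h1, h2, pvW, List.append_assoc]
    rw [hstep]
    have h1 : ((done.length : Int) + 1) + 1 = (((done ++ [r]).length : Int) + 1) := by
      simp only [List.length_append, List.length_cons, List.length_nil]; push_cast; ring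
    rw [h1, ih (done ++ [r]), List.append_assoc]
    rfl

-- B computes exactly the window list (case 1 ≤ n)
lemma pvAltEq (text : String) (n : Int) (hn : 1 ≤ n) :
    ngram_split_py_alt text n =
      (pvWins (PySem.Str.split₀ text) n.toNat).map String.ofList := by
  unfold ngram_split_py_alt pvWins
  rw [if_neg (by omega)]
  by_cases hsmall : (PySem.Str.split₀ text).length + 1 ≤ n.toNat
  · have hm : ((PySem.Str.split₀ text).length : Int) - n + 1 ≤ 0 := by omega
    have hk : (PySem.Str.split₀ text).length + 1 - n.toNat = 0 := by omega
    rw [PySem.List.pyRange_one_eq_nil hm, hk]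
    simp
  · have hm : ((PySem.Str.split₀ text).length : Int) - n + 1
        = (((PySem.Str.split₀ text).length + 1 - n.toNat : Nat) : Int) := by omega
    rw [hm, PySem.List.pyRange_zero_natCast, List.map_map, List.map_map]
    apply List.map_congr_left
    intro i hi
    have hi' : i < (PySem.Str.split₀ text).length + 1 - n.toNat := List.mem_range.1 hi
    simp only [Function.comp]
    have hc : ((i : Int) + n) = (((i + n.toNat : Nat)) : Int) := by push_cast; omega
    rw [hc, PySem.List.slice_natCast]
    have hsub : i + n.toNat - i = n.toNat := by omega
    rw [hsub]
    have hne : (((PySem.Str.split₀ text).drop i).take n.toNat).map String.toList ≠ [] := by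
      simp only [ne_eq, List.map_eq_nil_iff, List.take_eq_nil_iff, List.drop_eq_nil_iff, not_or]
      constructor <;> omega
    rw [pvJoin _ hne, List.map_map]
    rfl

-- ===== VERDICT (by name: the statement is the Claim_ definition above) =====
theorem ngram_split_py_spec : Claim_equal_ngram_split_py := by
  unfold Claim_equal_ngram_split_py Spec_ngram_split_py
  intro text n _
  by_cases hn : n < 1
  · -- nothing is yielded, B's guard returns []
    unfold ngram_split_py ngram_split_py_alt
    simp only [if_pos hn]
    have := pvLoop0 n hn (PySem.Str.split₀ text) []
    simpa using congrArg (fun s => s.2.2) this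
  · push_neg at hn
    unfold ngram_split_py
    have h0 : (([], (0 : Int), ([] : List String)) : List Char × Int × List String) = pvS n [] := by
      have ht : 1 - n.toNat = 0 := by omega
      simp [pvS, pvWins, ht, show (0 : Int) < n by omega]
    rw [h0]
    have := pvLoop n hn (PySem.Str.split₀ text) [] (by simp)
      (fun x hx => pvWordNoSpace text x hx)
    simp only [List.length_nil, Int.natCast_zero, zero_add] at this
    rw [List.nil_append] at this
    rw [this, pvAltEq text n hn]
    rfl
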